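-- pv_equiv track=rewrite | github.com/Y-XT/Second | tools/uavula/pred_eval_uavula.py | _infer_model_branch_from_encoder_sd
-- ===== SOURCE A (Python) =====
-- from typing import Dict, List, Optional, Tuple
--
-- def _infer_model_branch_from_encoder_sd(enc_sd: Dict[str, object]) -> Optional[str]:
--     keys = [k for k in enc_sd.keys() if isinstance(k, str)]
--     if not keys:
--         return None
--
--     if any(k.startswith('encoder.encoder.layer1.') for k in keys) and any(k.startswith('decoder.up1.net.') for k in keys):
--         return 'SPIDepth'
--
--     if any(k.startswith('backbone.downsample_layers.') for k in keys) and \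
--             any(k.startswith('backbone.stages.') for k in keys):
--         return 'monodepth2_dino'
--
--     if any(k.startswith('stem.') for k in keys) and any(k.startswith('patch_embed_stages.') for k in keys):
--         return 'MonoViT'
--
--     if any(k.startswith('downsample_layers.') for k in keys) and any(k.startswith('stages.') for k in keys):
--         return 'LiteMono'
--
--     if any(k.startswith('encoder.conv1.') for k in keys) and any(k.startswith('encoder.layer1.') for k in keys):
--         return 'MonoDepth2'
--
--     return None
-- ===== SOURCE B (Python) =====
-- _RULES = [
--     ('SPIDepth', 'encoder.encoder.layer1.', 'decoder.up1.net.'),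
--     ('monodepth2_dino', 'backbone.downsample_layers.', 'backbone.stages.'),
--     ('MonoViT', 'stem.', 'patch_embed_stages.'),
--     ('LiteMono', 'downsample_layers.', 'stages.'),
--     ('MonoDepth2', 'encoder.conv1.', 'encoder.layer1.'),
-- ]
-- _PREFIXES = [p for r in _RULES for p in r[1:]]
--
-- def _infer_model_branch_from_encoder_sd(enc_sd):
--     # One pass: build the set of candidate prefixes present among string keys,
--     # then evaluate the branch rules in priority order against that index.
--     present = set()
--     for k in enc_sd.keys():
--         if isinstance(k, str):
--             for p in _PREFIXES:
--                 if k.startswith(p):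
--                     present.add(p)
--     for name, p1, p2 in _RULES:
--         if p1 in present and p2 in present:
--             return name
--     return None
-- ===== Notes on version B (the rewrite author's own statement) =====
-- stated objective: alternative
-- what changed: Instead of ten separate any() scans over the key list guarded by an if/elif chain, B makes one pass over the keys building a set of present candidate prefixes, then evaluates the five branch rules as a data-driven table lookup against that index (the redundant empty-keys early return disappears: with no keys no rule matches).
import Mathlib
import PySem

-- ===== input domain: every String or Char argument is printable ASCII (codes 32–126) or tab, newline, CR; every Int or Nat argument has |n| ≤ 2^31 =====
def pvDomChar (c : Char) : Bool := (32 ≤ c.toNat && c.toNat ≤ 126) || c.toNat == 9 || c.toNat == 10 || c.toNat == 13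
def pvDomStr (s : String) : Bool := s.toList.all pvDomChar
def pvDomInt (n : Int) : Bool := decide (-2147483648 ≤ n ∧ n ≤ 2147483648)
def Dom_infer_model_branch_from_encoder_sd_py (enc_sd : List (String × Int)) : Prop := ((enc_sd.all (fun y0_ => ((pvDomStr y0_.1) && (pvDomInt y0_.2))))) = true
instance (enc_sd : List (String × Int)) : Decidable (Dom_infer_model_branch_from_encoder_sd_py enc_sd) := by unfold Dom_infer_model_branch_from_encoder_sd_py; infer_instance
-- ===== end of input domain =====

-- B replaces A's five guarded pairs of any() scans by one pass that indexes which
-- candidate prefixes are present, then a data-driven check of the rule table (alternative decomposition).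

-- ===== PORT A =====
def infer_model_branch_from_encoder_sd_py (enc_sd : List (String × Int)) : Option String :=
  -- keys = [k for k in enc_sd.keys() if isinstance(k, str)]  (all keys are strings here)
  let keys := enc_sd.map Prod.fst
  if keys.isEmpty then none
  else if keys.any (fun k => PySem.Str.startswith k "encoder.encoder.layer1.") &&
          keys.any (fun k => PySem.Str.startswith k "decoder.up1.net.") then some "SPIDepth"
  else if keys.any (fun k => PySem.Str.startswith k "backbone.downsample_layers.") &&
          keys.any (fun k => PySem.Str.startswith k "backbone.stages.") then some "monodepth2_dino"
  else if keys.any (fun k => PySem.Str.startswith k "stem.") &&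
          keys.any (fun k => PySem.Str.startswith k "patch_embed_stages.") then some "MonoViT"
  else if keys.any (fun k => PySem.Str.startswith k "downsample_layers.") &&
          keys.any (fun k => PySem.Str.startswith k "stages.") then some "LiteMono"
  else if keys.any (fun k => PySem.Str.startswith k "encoder.conv1.") &&
          keys.any (fun k => PySem.Str.startswith k "encoder.layer1.") then some "MonoDepth2"
  else none

-- ===== PORT B =====
def pvRules : List (String × String × String) :=
  [("SPIDepth", "encoder.encoder.layer1.", "decoder.up1.net."),
   ("monodepth2_dino", "backbone.downsample_layers.", "backbone.stages."),
   ("MonoViT", "stem.", "patch_embed_stages."),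
   ("LiteMono", "downsample_layers.", "stages."),
   ("MonoDepth2", "encoder.conv1.", "encoder.layer1.")]

def pvPrefixes : List String := pvRules.flatMap (fun r => [r.2.1, r.2.2])

-- the one-pass presence index (the `present` set built by Source B's loop)
def pvPresent (enc_sd : List (String × Int)) : PySem.Set String :=
  enc_sd.foldl
    (fun s kv =>
      pvPrefixes.foldl (fun s p => if PySem.Str.startswith kv.1 p then PySem.Set.add s p else s) s)
    PySem.Set.empty

def infer_model_branch_from_encoder_sd_py_alt (enc_sd : List (String × Int)) : Option String :=
  let present := pvPresent enc_sd
  match pvRules.find? (fun r => PySem.Set.contains present r.2.1 && PySem.Set.contains present r.2.2) with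
  | some r => some r.1
  | none => none

-- ===== PRECONDITION & SPEC =====
def Spec_infer_model_branch_from_encoder_sd_py (enc_sd : List (String × Int)) (out : Option String) : Prop := out = infer_model_branch_from_encoder_sd_py_alt enc_sd
instance (enc_sd : List (String × Int)) (out : Option String) : Decidable (Spec_infer_model_branch_from_encoder_sd_py enc_sd out) := by unfold Spec_infer_model_branch_from_encoder_sd_py; infer_instance

-- ===== CLAIM (what is proved, stated in full; the proofs are below) =====
def Claim_equal_infer_model_branch_from_encoder_sd_py : Prop := ∀ (enc_sd : List (String × Int)), Dom_infer_model_branch_from_encoder_sd_py enc_sd → Spec_infer_model_branch_from_encoder_sd_py enc_sd (infer_model_branch_from_encoder_sd_py enc_sd)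

-- ===== LEMMAS AND PROOFS =====


-- the shared five-rule decision, abstracted over the ten presence bits
theorem pv_chain (b1 b2 b3 b4 b5 b6 b7 b8 b9 b10 : Bool) :
    (if (b1 && b2) = true then some "SPIDepth"
      else
        if (b3 && b4) = true then some "monodepth2_dino"
        else
          if (b5 && b6) = true then some "MonoViT"
          else if (b7 && b8) = true then some "LiteMono" else if (b9 && b10) = true then some "MonoDepth2" else none) =
      (match
        match b1 && b2 with
        | true => some (("SPIDepth", "encoder.encoder.layer1.", "decoder.up1.net.") : String × String × String)
        | false =>
          match b3 && b4 with
          | true => some ("monodepth2_dino", "backbone.downsample_layers.", "backbone.stages.")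
          | false =>
            match b5 && b6 with
            | true => some ("MonoViT", "stem.", "patch_embed_stages.")
            | false =>
              match b7 && b8 with
              | true => some ("LiteMono", "downsample_layers.", "stages.")
              | false =>
                match b9 && b10 with
                | true => some ("MonoDepth2", "encoder.conv1.", "encoder.layer1.")
                | false => none with
      | some r => some r.1
      | none => (none : Option String)) := by
  cases b1 <;> cases b2 <;> cases b3 <;> cases b4 <;> cases b5 <;> cases b6 <;> cases b7 <;> cases b8 <;> cases b9 <;> cases b10 <;> rfl

-- inner loop of pvPresent: membership after scanning one key against all prefixes
theorem pv_mem_inner (k p : String) (ps s : List String) :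
    p ∈ ps.foldl (fun s q => if PySem.Str.startswith k q then PySem.Set.add s q else s) s ↔
      p ∈ s ∨ (p ∈ ps ∧ PySem.Str.startswith k p = true) := by
  induction ps generalizing s with
  | nil => simp
  | cons q ps ih =>
    simp only [List.foldl_cons, ih]
    by_cases hq : PySem.Str.startswith k q = true
    · simp only [hq, if_pos]
      rw [PySem.Set.mem_add]
      constructor
      · rintro ((h | rfl) | h)
        · exact Or.inl h
        · exact Or.inr ⟨List.mem_cons_self .., hq⟩
        · exact Or.inr ⟨List.mem_cons_of_mem _ h.1, h.2⟩
      · rintro (h | ⟨hm, hs⟩)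
        · exact Or.inl (Or.inl h)
        · rcases List.mem_cons.mp hm with rfl | hm
          · exact Or.inl (Or.inr rfl)
          · exact Or.inr ⟨hm, hs⟩
    · simp only [hq, if_neg, Bool.false_eq_true, not_false_iff]
      constructor
      · rintro (h | h)
        · exact Or.inl h
        · exact Or.inr ⟨List.mem_cons_of_mem _ h.1, h.2⟩
      · rintro (h | ⟨hm, hs⟩)
        · exact Or.inl h
        · rcases List.mem_cons.mp hm with rfl | hm
          · exact absurd hs hq
          · exact Or.inr ⟨hm, hs⟩

-- outer loop of pvPresent
theorem pv_mem_outer (p : String) (l : List (String × Int)) (s : List String) :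
    p ∈ l.foldl
        (fun s kv =>
          pvPrefixes.foldl (fun s q => if PySem.Str.startswith kv.1 q then PySem.Set.add s q else s) s)
        s ↔
      p ∈ s ∨ (p ∈ pvPrefixes ∧ ∃ kv ∈ l, PySem.Str.startswith kv.1 p = true) := by
  induction l generalizing s with
  | nil => simp
  | cons kv l ih =>
    simp only [List.foldl_cons, ih, pv_mem_inner]
    constructor
    · rintro ((h | ⟨hp, hs⟩) | ⟨hp, kv', hm, hs⟩)
      · exact Or.inl h
      · exact Or.inr ⟨hp, kv, List.mem_cons_self .., hs⟩
      · exact Or.inr ⟨hp, kv', List.mem_cons_of_mem _ hm, hs⟩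
    · rintro (h | ⟨hp, kv', hm, hs⟩)
      · exact Or.inl (Or.inl h)
      · rcases List.mem_cons.mp hm with rfl | hm
        · exact Or.inl (Or.inr ⟨hp, hs⟩)
        · exact Or.inr ⟨hp, kv', hm, hs⟩

theorem pv_contains_present (enc_sd : List (String × Int)) (p : String) (hp : p ∈ pvPrefixes) :
    PySem.Set.contains (pvPresent enc_sd) p =
      (enc_sd.map Prod.fst).any (fun k => PySem.Str.startswith k p) := by
  rcases h : (enc_sd.map Prod.fst).any (fun k => PySem.Str.startswith k p) with _ | _
  · rw [← Bool.not_eq_true, PySem.Set.contains_iff, pvPresent, pv_mem_outer]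
    rw [List.any_eq_false] at h
    rintro (hmem | ⟨-, kv, hm, hs⟩)
    · simp [PySem.Set.empty] at hmem
    · exact absurd hs (h kv.1 (List.mem_map_of_mem hm))
  · rw [PySem.Set.contains_iff, pvPresent, pv_mem_outer]
    simp only [List.any_eq_true, List.mem_map] at h
    obtain ⟨k, ⟨kv, hm, rfl⟩, hs⟩ := h
    exact Or.inr ⟨hp, kv, hm, hs⟩

-- ===== VERDICT (by name: the statement is the Claim_ definition above) =====
theorem infer_model_branch_from_encoder_sd_py_spec : Claim_equal_infer_model_branch_from_encoder_sd_py := by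
  intro enc_sd _
  unfold Spec_infer_model_branch_from_encoder_sd_py
  unfold infer_model_branch_from_encoder_sd_py infer_model_branch_from_encoder_sd_py_alt
  have hc : ∀ p ∈ pvPrefixes, PySem.Set.contains (pvPresent enc_sd) p =
      (enc_sd.map Prod.fst).any (fun k => PySem.Str.startswith k p) :=
    fun p hp => pv_contains_present enc_sd p hp
  simp only [pvRules, List.find?]
  rw [hc "encoder.encoder.layer1." (by decide), hc "decoder.up1.net." (by decide),
      hc "backbone.downsample_layers." (by decide), hc "backbone.stages." (by decide),
      hc "stem." (by decide), hc "patch_embed_stages." (by decide),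
      hc "downsample_layers." (by decide), hc "stages." (by decide),
      hc "encoder.conv1." (by decide), hc "encoder.layer1." (by decide)]
  cases enc_sd with
  | nil => simp
  | cons kv l =>
    simp only [List.map_cons, List.isEmpty_cons, Bool.false_eq_true, if_false]
    exact pv_chain _ _ _ _ _ _ _ _ _ _
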